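-- pv_equiv track=rewrite | github.com/bruno-solutions/sttutter-bytter | app/slicer/sci.py | cluster_size_histogram
-- ===== SOURCE A (Python) =====
-- from typing import List, Union, Literal
--
-- def cluster_size_histogram(clusters: List[List[int]]) -> ({int: int}, int, int, float):
--     histogram: {} = {}
--     for cluster in clusters:
--         key: int = len(cluster)
--         histogram[key] = histogram[key] + 1 if key in histogram else 1
--
--     low: int = len(clusters)
--     high: int = 0
--     accumulator: int = 0
--     for key in sorted(histogram, reverse=True):
--         frequency: int = histogram[key]
--         if low > frequency:
--             low = frequency
--         if high < frequency:
--             high = frequency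
--         accumulator += frequency
--         del histogram[key]
--         histogram[key] = frequency
--
--     frequencies: int = len(histogram)
--     return histogram, low, high, accumulator // frequencies if frequencies else 0
-- ===== SOURCE B (Python) =====
-- def cluster_size_histogram(clusters):
--     # sort all cluster sizes ascending, then run-length-encode the sorted list,
--     # prepending each new run so the encoding ends up in descending key order
--     sizes = sorted(len(cluster) for cluster in clusters)
--     runs = []
--     for s in sizes:
--         if runs and runs[0][0] == s:
--             runs[0] = (s, runs[0][1] + 1)
--         else:
--             runs.insert(0, (s, 1))
--     histogram = dict(runs)
--     if not runs:
--         return {}, 0, 0, 0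
--     counts = [c for _, c in runs]
--     return histogram, min(counts), max(counts), len(sizes) // len(runs)
-- ===== Notes on version B (the rewrite author's own statement) =====
-- stated objective: alternative
-- what changed: Replaces A's dict-counting pass plus descending key-sort/delete-reinsert loop with a sort-then-scan algorithm: sort all cluster sizes ascending, run-length-encode the sorted list (prepending each new run so the encoding comes out in descending key order), then take min/max of the run lengths and len(sizes)//len(runs).
import Mathlib
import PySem

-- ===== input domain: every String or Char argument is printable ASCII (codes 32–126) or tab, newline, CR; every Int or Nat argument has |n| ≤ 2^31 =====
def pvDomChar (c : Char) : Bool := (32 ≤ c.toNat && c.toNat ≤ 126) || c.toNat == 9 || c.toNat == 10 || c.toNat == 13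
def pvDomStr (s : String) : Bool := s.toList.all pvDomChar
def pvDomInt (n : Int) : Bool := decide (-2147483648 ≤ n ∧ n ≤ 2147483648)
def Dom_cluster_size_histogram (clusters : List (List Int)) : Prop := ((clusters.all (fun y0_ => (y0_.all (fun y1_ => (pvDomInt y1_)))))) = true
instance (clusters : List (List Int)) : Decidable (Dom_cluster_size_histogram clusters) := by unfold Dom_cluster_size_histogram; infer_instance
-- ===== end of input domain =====

-- B replaces A's dict-counting pass plus key-sort/reinsert loop by sorting all sizes and
-- run-length-encoding the sorted list (runs prepended, so descending keys); objective: alternative.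

-- ===== PORT A =====
-- literal port of A: one counting loop building the dict, then one loop over the
-- descending-sorted keys updating low/high/accumulator and re-inserting each key.
-- 'histogram[key]' inside the second loop is ported as getD (the key is always present there).
def cluster_size_histogram (clusters : List (List Int)) : (List (Int × Int)) × Int × Int × Int :=
  let histogram : PySem.Dict Int Int := clusters.foldl
    (fun h cluster =>
      h.insert (cluster.length : Int)
        (if h.contains (cluster.length : Int) then h.getD (cluster.length : Int) 0 + 1 else 1))
    PySem.Dict.empty
  let st := (PySem.List.sorted histogram.keys (fun k => k) true).foldl
    (fun (s : PySem.Dict Int Int × Int × Int × Int) key =>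
      ((s.1.erase key).insert key (s.1.getD key 0),
       if s.2.1 > s.1.getD key 0 then s.1.getD key 0 else s.2.1,
       if s.2.2.1 < s.1.getD key 0 then s.1.getD key 0 else s.2.2.1,
       s.2.2.2 + s.1.getD key 0))
    (histogram, (clusters.length : Int), 0, 0)
  let frequencies : Int := (st.1.size : Int)
  (st.1.items, st.2.1, st.2.2.1,
   if frequencies ≠ 0 then PySem.Int.floordiv st.2.2.2 frequencies else 0)

-- ===== PORT B =====
-- literal port of Source B's loop body: compare/update the first run, else insert a new run at index 0
def pvRunStep (runs : List (Int × Int)) (s : Int) : List (Int × Int) :=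
  match runs with
  | (k, c) :: rest => if k = s then (s, c + 1) :: rest else (s, 1) :: (k, c) :: rest
  | [] => [(s, 1)]

-- literal port of Source B: sort sizes ascending, run-length-encode into 'runs' (descending keys),
-- dict(runs), then min/max over the run lengths and len(sizes) // len(runs).
def cluster_size_histogram_alt (clusters : List (List Int)) : (List (Int × Int)) × Int × Int × Int :=
  let sizes : List Int :=
    PySem.List.sorted (clusters.map (fun cluster => (cluster.length : Int))) (fun k => k) false
  let runs : List (Int × Int) := sizes.foldl pvRunStep []
  let histogram : PySem.Dict Int Int := runs.foldl (fun d p => d.insert p.1 p.2) PySem.Dict.empty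
  if runs = [] then ([], 0, 0, 0)
  else
    (histogram.items,
     (PySem.List.min? (runs.map (fun p => p.2)) (fun v => v)).getD 0,  -- counts nonempty here: min/max exact
     (PySem.List.max? (runs.map (fun p => p.2)) (fun v => v)).getD 0,
     PySem.Int.floordiv (sizes.length : Int) (runs.length : Int))

-- ===== PRECONDITION & SPEC =====
def Spec_cluster_size_histogram (clusters : List (List Int)) (out : (List (Int × Int)) × Int × Int × Int) : Prop := out = cluster_size_histogram_alt clusters
instance (clusters : List (List Int)) (out : (List (Int × Int)) × Int × Int × Int) : Decidable (Spec_cluster_size_histogram clusters out) := by unfold Spec_cluster_size_histogram; infer_instance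

-- ===== CLAIM (what is proved, stated in full; the proofs are below) =====
def Claim_equal_cluster_size_histogram : Prop := ∀ (clusters : List (List Int)), Dom_cluster_size_histogram clusters → Spec_cluster_size_histogram clusters (cluster_size_histogram clusters)

-- ===== LEMMAS AND PROOFS =====
-- ---- A side (counting loop = Counter; reorder loop characterised) ----
theorem histA_eq (clusters : List (List Int)) :
    clusters.foldl
      (fun h cluster =>
        h.insert (cluster.length : Int)
          (if h.contains (cluster.length : Int) then h.getD (cluster.length : Int) 0 + 1 else 1))
      PySem.Dict.empty
    = PySem.Dict.counter (clusters.map (fun cluster => (cluster.length : Int))) := by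
  rw [← PySem.Dict.foldl_insert_getD_add_one_eq_counter, List.foldl_map]
  congr 1
  funext h c
  by_cases hc : h.contains (c.length : Int)
  · simp [hc]
  · have hc' : h.contains (c.length : Int) = false := by simpa using hc
    simp [hc', PySem.Dict.getD_of_not_contains _ _ hc']

theorem find?_filter_ne (l : List (Int × Int)) (k j : Int) (hne : j ≠ k) :
    (PySem.Dict.mk (l.filter (fun p => !(p.1 == k)))).get? j = (PySem.Dict.mk l).get? j := by
  induction l with
  | nil => rfl
  | cons p rest ih =>
    obtain ⟨pk, pv⟩ := p
    by_cases hk : pk = k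
    · subst hk
      simp [PySem.Dict.get?_mk_cons, Ne.symm hne, ih]
    · simp only [List.filter_cons, show (!(pk == k)) = true by simp [hk], if_pos]
      rw [PySem.Dict.get?_mk_cons, PySem.Dict.get?_mk_cons, ih]

theorem getD_erase_of_ne (d : PySem.Dict Int Int) (k j : Int) (hne : j ≠ k) (d0 : Int) :
    (d.erase k).getD j d0 = d.getD j d0 := by
  obtain ⟨l⟩ := d
  simp [PySem.Dict.getD_eq_get?_getD, PySem.Dict.erase, find?_filter_ne l k j hne]

theorem contains_erase_self (d : PySem.Dict Int Int) (k : Int) :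
    (d.erase k).contains k = false := by
  obtain ⟨l⟩ := d
  simp [PySem.Dict.erase, PySem.Dict.contains_mk, List.any_filter]

theorem stepH_eq (d : PySem.Dict Int Int) (k : Int) (v : Int) :
    (d.erase k).insert k v
      = PySem.Dict.mk (d.items.filter (fun p => !(p.1 == k)) ++ [(k, v)]) := by
  rw [PySem.Dict.insert, contains_erase_self]
  simp [PySem.Dict.erase]

theorem getD_stepH (d : PySem.Dict Int Int) (k j v : Int) :
    ((d.erase k).insert k (d.getD k v)).getD j v = d.getD j v := by
  by_cases hj : j = k
  · subst hj; rw [PySem.Dict.getD_insert_self]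
  · rw [PySem.Dict.getD_insert_of_ne _ _ _ hj, getD_erase_of_ne _ _ _ hj]

theorem loopA (ks : List Int) : ∀ (h : PySem.Dict Int Int) (low high acc : Int), ks.Nodup →
    ks.foldl (fun (s : PySem.Dict Int Int × Int × Int × Int) key =>
        ((s.1.erase key).insert key (s.1.getD key 0),
         if s.2.1 > s.1.getD key 0 then s.1.getD key 0 else s.2.1,
         if s.2.2.1 < s.1.getD key 0 then s.1.getD key 0 else s.2.2.1,
         s.2.2.2 + s.1.getD key 0)) (h, low, high, acc)
    = (PySem.Dict.mk (h.items.filter (fun p => !(ks.contains p.1)) ++ ks.map (fun k => (k, h.getD k 0))),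
       (ks.map (fun k => h.getD k 0)).foldl (fun l f => if l > f then f else l) low,
       (ks.map (fun k => h.getD k 0)).foldl (fun g f => if g < f then f else g) high,
       acc + (ks.map (fun k => h.getD k 0)).sum) := by
  induction ks with
  | nil =>
    intro h low high acc _
    simp
  | cons k ks ih =>
    intro h low high acc hnd
    obtain ⟨hk, hnd'⟩ := List.nodup_cons.mp hnd
    simp only [List.foldl_cons, List.map_cons]
    rw [ih _ _ _ _ hnd']
    have hgetD : ∀ j : Int, ((h.erase k).insert k (h.getD k 0)).getD j 0 = h.getD j 0 :=
      fun j => getD_stepH h k j 0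
    have hmaps : ks.map (fun j => ((h.erase k).insert k (h.getD k 0)).getD j 0)
        = ks.map (fun j => h.getD j 0) := by
      exact List.map_congr_left (fun j _ => hgetD j)
    refine Prod.ext ?_ (Prod.ext ?_ (Prod.ext ?_ ?_)) <;>
      simp only [hgetD, List.sum_cons]
    · rw [stepH_eq]
      simp only [List.filter_append]
      have h1 : (List.filter (fun p => !ks.contains p.1) [(k, h.getD k 0)])
          = [(k, h.getD k 0)] := by
        simp [List.contains_eq_mem, hk]
      rw [h1, List.filter_filter]
      have h2 : (fun (p : Int × Int) => !ks.contains p.1 && !(p.1 == k))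
          = (fun p => !((k :: ks).contains p.1)) := by
        funext p
        by_cases hp : p.1 = k <;> simp [hp, List.contains_eq_mem]
      rw [h2]
      simp
    · ring

-- ---- B side: the fold is a run-length encoding of the sorted size list ----
def pvRuns (k c : Int) : List Int → List (Int × Int)
  | [] => [(k, c)]
  | x :: xs => if x = k then pvRuns k (c + 1) xs else pvRuns x 1 xs ++ [(k, c)]

theorem foldl_pvRunStep (l : List Int) : ∀ (k c : Int) (acc : List (Int × Int)),
    l.foldl pvRunStep ((k, c) :: acc) = pvRuns k c l ++ acc := by
  induction l with
  | nil => intro k c acc; rfl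
  | cons x xs ih =>
    intro k c acc
    simp only [List.foldl_cons]
    by_cases h : x = k
    · subst h
      show xs.foldl pvRunStep ((if x = x then (x, c + 1) :: acc else _)) = _
      rw [if_pos rfl, ih, pvRuns, if_pos rfl]
    · show xs.foldl pvRunStep ((if k = x then _ else (x, 1) :: (k, c) :: acc)) = _
      rw [if_neg (fun hkx => h hkx.symm), ih, pvRuns, if_neg h, List.append_assoc]
      rfl

theorem pvRuns_spec (l : List Int) : ∀ (k c : Int),
    (∀ y ∈ l, k ≤ y) → l.Pairwise (· ≤ ·) →
    (∀ j ∈ (pvRuns k c l).map Prod.fst, k ≤ j) ∧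
    ((pvRuns k c l).map Prod.fst).Pairwise (· > ·) ∧
    (∀ j : Int, j ∈ (pvRuns k c l).map Prod.fst ↔ j = k ∨ j ∈ l) ∧
    (∀ p ∈ pvRuns k c l, p.2 = if p.1 = k then c + (l.count k : Int) else (l.count p.1 : Int)) := by
  induction l with
  | nil =>
    intro k c _ _
    refine ⟨?_, ?_, ?_, ?_⟩
    · intro j hj; simp [pvRuns] at hj; omega
    · simp [pvRuns]
    · intro j; simp [pvRuns]
    · intro p hp; simp [pvRuns] at hp; simp [hp]
  | cons x xs ih =>
    intro k c hall hpw
    have hxle : ∀ y ∈ xs, x ≤ y := fun y hy => (List.pairwise_cons.mp hpw).1 y hy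
    have hpw' : xs.Pairwise (· ≤ ·) := (List.pairwise_cons.mp hpw).2
    by_cases h : x = k
    · subst h
      have hall' : ∀ y ∈ xs, x ≤ y := hxle
      obtain ⟨ih1, ih2, ih3, ih4⟩ := ih x (c + 1) hall' hpw'
      rw [pvRuns, if_pos rfl]
      refine ⟨ih1, ih2, ?_, ?_⟩
      · intro j; rw [ih3]; simp
      · intro p hp
        have := ih4 p hp
        by_cases hpk : p.1 = x
        · rw [this, if_pos hpk, if_pos hpk, List.count_cons_self]
          push_cast; ring
        · rw [this, if_neg hpk, if_neg hpk, List.count_cons_of_ne (Ne.symm hpk)]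
    · have hkx : k < x := lt_of_le_of_ne (hall x (by simp)) (fun e => h e.symm)
      obtain ⟨ih1, ih2, ih3, ih4⟩ := ih x 1 hxle hpw'
      rw [pvRuns, if_neg h]
      have hknot : k ∉ x :: xs := by
        intro hk
        rcases List.mem_cons.mp hk with hk | hk
        · exact h hk.symm
        · exact absurd (hxle k hk) (not_le.mpr hkx)
      refine ⟨?_, ?_, ?_, ?_⟩
      · intro j hj
        rw [List.map_append, List.mem_append] at hj
        rcases hj with hj | hj
        · exact le_of_lt (lt_of_lt_of_le hkx (ih1 j hj))
        · simp at hj; omega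
      · rw [List.map_append]
        rw [List.pairwise_append]
        refine ⟨ih2, by simp, ?_⟩
        intro a ha b hb
        simp at hb
        subst hb
        exact lt_of_lt_of_le hkx (ih1 a ha)
      · intro j
        rw [List.map_append, List.mem_append, ih3]
        simp only [List.map_cons, List.map_nil, List.mem_cons]
        tauto
      · intro p hp
        rcases List.mem_append.mp hp with hp | hp
        · have hpge : x ≤ p.1 := ih1 p.1 (List.mem_map_of_mem hp)
          have hpk : p.1 ≠ k := fun e => absurd (e ▸ hpge) (not_le.mpr hkx)
          have := ih4 p hp
          rw [this, if_neg hpk]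
          by_cases hpx : p.1 = x
          · rw [if_pos hpx, hpx, List.count_cons_self]
            push_cast; ring
          · rw [if_neg hpx, List.count_cons_of_ne (Ne.symm hpx)]
        · simp only [List.mem_singleton] at hp
          subst hp
          simp [List.count_eq_zero_of_not_mem hknot]
theorem pairs_eq_map_fst (r : List (Int × Int)) (g : Int → Int)
    (h : ∀ p ∈ r, p.2 = g p.1) : r = (r.map Prod.fst).map (fun j => (j, g j)) := by
  induction r with
  | nil => rfl
  | cons p t ih =>
    simp only [List.map_cons]
    rw [← ih (fun q hq => h q (List.mem_cons_of_mem p hq)), ← h p (by simp)]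

-- min/max folds vs PySem.List.min?/max?
theorem min?_cons_cons (v0 x : Int) (xs : List Int) :
    PySem.List.min? (v0 :: x :: xs) (fun v => v) = PySem.List.min? (min v0 x :: xs) (fun v => v) := by
  simp only [PySem.List.min?, List.foldl_cons]
  congr 1
  split_ifs with h <;> simp [min_def] <;> omega

theorem max?_cons_cons (v0 x : Int) (xs : List Int) :
    PySem.List.max? (v0 :: x :: xs) (fun v => v) = PySem.List.max? (max v0 x :: xs) (fun v => v) := by
  simp only [PySem.List.max?, List.foldl_cons]
  congr 1
  split_ifs with h <;> simp [max_def] <;> omega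

theorem min?_some (vt : List Int) : ∀ v0 : Int,
    PySem.List.min? (v0 :: vt) (fun v => v) = some (vt.foldl min v0) := by
  induction vt with
  | nil => intro v0; rfl
  | cons x xs ih =>
    intro v0
    rw [min?_cons_cons, ih (min v0 x), List.foldl_cons]

theorem max?_some (vt : List Int) : ∀ v0 : Int,
    PySem.List.max? (v0 :: vt) (fun v => v) = some (vt.foldl max v0) := by
  induction vt with
  | nil => intro v0; rfl
  | cons x xs ih =>
    intro v0
    rw [max?_cons_cons, ih (max v0 x), List.foldl_cons]

theorem minfun_eq : (fun (l f : Int) => if l > f then f else l) = min := by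
  funext l f; split_ifs with h <;> simp [min_def] <;> omega

theorem maxfun_eq : (fun (g f : Int) => if g < f then f else g) = max := by
  funext g f; split_ifs with h <;> simp [max_def] <;> omega

theorem cluster_size_histogram_main (clusters : List (List Int)) :
    cluster_size_histogram clusters = cluster_size_histogram_alt clusters := by
  by_cases hnil : clusters = []
  · subst hnil; rfl
  · simp only [cluster_size_histogram, cluster_size_histogram_alt]
    rw [histA_eq clusters, PySem.Dict.keys_counter]
    set sizes := clusters.map (fun cluster => (cluster.length : Int)) with hsizes
    set ks := PySem.List.sorted (PySem.Set.ofList sizes) (fun k => k) true with hks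
    have hnd : ks.Nodup :=
      ((PySem.List.sorted_perm (PySem.Set.ofList sizes) (fun k => k) true).nodup_iff).mpr
        (PySem.Set.nodup_ofList sizes)
    rw [loopA ks _ _ _ _ hnd]
    set s := PySem.List.sorted sizes (fun k => k) false with hs
    have hsne : sizes ≠ [] := by
      simp only [hsizes, ne_eq, List.map_eq_nil_iff]
      exact hnil
    have hsne' : s ≠ [] := by
      rw [hs, ne_eq, PySem.List.sorted_eq_nil_iff]
      exact hsne
    obtain ⟨x, xs, hxs⟩ : ∃ x xs, s = x :: xs := by
      cases hc : s with
      | nil => exact absurd hc hsne'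
      | cons a b => exact ⟨a, b, rfl⟩
    have hruns : s.foldl pvRunStep [] = pvRuns x 1 xs := by
      rw [hxs]
      show xs.foldl pvRunStep [(x, 1)] = _
      rw [foldl_pvRunStep xs x 1 [], List.append_nil]
    have hspw : s.Pairwise (· ≤ ·) := PySem.List.sorted_pairwise sizes (fun k => k)
    rw [hxs] at hspw
    have hxle : ∀ y ∈ xs, x ≤ y := (List.pairwise_cons.mp hspw).1
    have hxspw : xs.Pairwise (· ≤ ·) := (List.pairwise_cons.mp hspw).2
    obtain ⟨f1, f2, f3, f4⟩ := pvRuns_spec xs x 1 hxle hxspw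
    set runs := pvRuns x 1 xs with hrdef
    have hkn : (runs.map Prod.fst).Nodup := f2.imp (fun h => ne_of_gt h)
    have hmemS : ∀ j : Int, j ∈ runs.map Prod.fst ↔ j ∈ sizes := by
      intro j
      rw [f3 j]
      have : j ∈ s ↔ j ∈ sizes := by
        rw [hs]; exact PySem.List.mem_sorted sizes (fun k => k) false j
      rw [← this, hxs, List.mem_cons]
    have hperm : (runs.map Prod.fst).Perm (PySem.Set.ofList sizes) := by
      rw [List.perm_ext_iff_of_nodup hkn (PySem.Set.nodup_ofList sizes)]
      intro j
      rw [hmemS j, PySem.Set.mem_ofList]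
    have hkeq : ks = runs.map Prod.fst := by
      rw [hks]
      exact PySem.List.sorted_rev_eq_of_perm_of_pairwise_gt (PySem.Set.ofList sizes)
        (runs.map Prod.fst) (fun k => k) hperm f2
    have hcount : ∀ j : Int, s.count j = sizes.count j := fun j =>
      (PySem.List.sorted_perm sizes (fun k => k) false).count_eq j
    have hpv : ∀ p ∈ runs, p.2 = ((sizes.count p.1 : Nat) : Int) := by
      intro p hp
      have h4 := f4 p hp
      have hc : sizes.count p.1 = (x :: xs).count p.1 := by rw [← hcount, hxs]
      by_cases hpx : p.1 = x
      · rw [if_pos hpx] at h4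
        rw [h4, hc, hpx, List.count_cons_self]
        push_cast; ring
      · rw [if_neg hpx] at h4
        rw [h4, hc, List.count_cons_of_ne (Ne.symm hpx)]
    have hreq : runs = ks.map (fun j => (j, ((sizes.count j : Nat) : Int))) := by
      rw [hkeq]
      exact pairs_eq_map_fst runs _ hpv
    have hitems : (runs.foldl (fun d p => d.insert p.1 p.2) PySem.Dict.empty).items = runs := by
      have := PySem.Dict.items_foldl_insert_fresh runs Prod.fst Prod.snd PySem.Dict.empty
        (fun a _ => PySem.Dict.contains_empty a.1) hkn
      simpa using this
    have hrne : runs ≠ [] := by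
      intro h0
      have := (f3 x).mpr (Or.inl rfl)
      rw [h0] at this
      simp at this
    have hksne : ks ≠ [] := by
      rw [hkeq]
      simpa using hrne
    obtain ⟨k0, kt, hkse⟩ : ∃ k0 kt, ks = k0 :: kt := by
      cases hc : ks with
      | nil => exact absurd hc hksne
      | cons a b => exact ⟨a, b, rfl⟩
    have hfilter : List.filter (fun p => !ks.contains p.1) (PySem.Dict.counter sizes).items = [] := by
      rw [List.filter_eq_nil_iff]
      intro p hp
      have h1 : p.1 ∈ (PySem.Dict.counter sizes).keys := PySem.Dict.mem_keys_of_mem_items _ hp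
      rw [PySem.Dict.keys_counter] at h1
      have h2 : p.1 ∈ ks := by
        rw [hkeq, hmemS, ← PySem.Set.mem_ofList]
        exact h1
      simp [List.contains_eq_mem, h2]
    have hgd : (fun k => (PySem.Dict.counter sizes).getD k 0)
        = (fun k : Int => ((sizes.count k : Nat) : Int)) := by
      funext k
      rw [PySem.Dict.getD_counter]
    have hgd2 : (fun k => (k, (PySem.Dict.counter sizes).getD k 0))
        = (fun k : Int => (k, ((sizes.count k : Nat) : Int))) := by
      funext k
      rw [PySem.Dict.getD_counter]
    have hsum : (ks.map (fun k : Int => ((sizes.count k : Nat) : Int))).sum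
        = (clusters.length : Int) := by
      have hperm2 : ks.Perm sizes.dedup := by
        refine (PySem.List.sorted_perm _ _ _).trans ?_
        rw [List.perm_ext_iff_of_nodup (PySem.Set.nodup_ofList sizes) (List.nodup_dedup sizes)]
        intro a
        rw [PySem.Set.mem_ofList, List.mem_dedup]
      rw [List.Perm.sum_eq (hperm2.map _)]
      have : ∀ l : List Int, (l.map (fun k : Int => ((sizes.count k : Nat) : Int)))
          = (l.map (fun k => sizes.count k)).map (fun n : Nat => (n : Int)) := by
        intro l
        rw [List.map_map]
        rfl
      rw [this, ← Nat.cast_list_sum, List.sum_map_count_dedup_eq_length]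
      simp [hsizes]
    rw [hgd, hgd2, hfilter, hruns, hitems, if_neg hrne]
    have hszA : (PySem.Dict.mk (List.map (fun k : Int => (k, ((sizes.count k : Nat) : Int))) ks)).size
        = ks.length := by simp [PySem.Dict.size]
    have hlen : ks.length ≠ 0 := by rw [hkse]; simp
    dsimp only
    simp only [List.nil_append]
    rw [if_pos (by rw [hszA]; exact fun h => hlen (by exact_mod_cast h))]
    have hvals : runs.map (fun p => p.2) = ks.map (fun k : Int => ((sizes.count k : Nat) : Int)) := by
      rw [hreq, List.map_map]
      rfl
    refine Prod.ext ?_ (Prod.ext ?_ (Prod.ext ?_ ?_))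
    · dsimp only
      rw [hreq]
    · dsimp only
      rw [minfun_eq, hvals, hkse, List.map_cons, List.foldl_cons, min?_some, Option.getD_some]
      congr 1
      refine min_eq_right ?_
      have h1 : sizes.count k0 ≤ sizes.length := List.count_le_length
      have h2 : sizes.length = clusters.length := by simp [hsizes]
      exact_mod_cast h2 ▸ h1
    · dsimp only
      rw [maxfun_eq, hvals, hkse, List.map_cons, List.foldl_cons, max?_some, Option.getD_some]
      rw [max_eq_right (by positivity : (0 : Int) ≤ ((sizes.count k0 : Nat) : Int))]
    · dsimp only
      rw [zero_add, hsum, hszA]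
      have hslen : (s.length : Int) = (clusters.length : Int) := by
        rw [hs, PySem.List.length_sorted]
        simp [hsizes]
      rw [hreq, List.length_map, hslen]

-- ===== VERDICT (by name: the statement is the Claim_ definition above) =====
theorem cluster_size_histogram_spec : Claim_equal_cluster_size_histogram := by
  intro clusters _
  exact cluster_size_histogram_main clusters
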